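-- pv_equiv track=rewrite | github.com/msharp9/predictivetext | markov.py | window_gen
-- ===== SOURCE A (Python) =====
-- def window_gen(data, size):
--     win = []
--     for thing in data:
--         win.append(thing)
--         if len(win) == size:
--             yield win
--             win = win[1:]
--     for i in range(len(win)):
--         yield win[i:]
-- ===== SOURCE B (Python) =====
-- def window_gen(data, size):
--     data = list(data)
--     n = len(data)
--     k = n - size + 1 if size >= 1 and n >= size else 0
--     for j in range(k):
--         yield data[j:j+size]
--     for i in range(k, n):
--         yield data[i:]
-- ===== Notes on version B (the rewrite author's own statement) =====
-- stated objective: simpler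
-- what changed: Replaced A's incremental append/slice-drop window state machine by a closed-form cut point k = n-size+1 (0 when size<1 or n<size) with direct slicing: fixed windows data[j:j+size] for j<k, then trailing suffixes data[i:] for k<=i<n.
import Mathlib
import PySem

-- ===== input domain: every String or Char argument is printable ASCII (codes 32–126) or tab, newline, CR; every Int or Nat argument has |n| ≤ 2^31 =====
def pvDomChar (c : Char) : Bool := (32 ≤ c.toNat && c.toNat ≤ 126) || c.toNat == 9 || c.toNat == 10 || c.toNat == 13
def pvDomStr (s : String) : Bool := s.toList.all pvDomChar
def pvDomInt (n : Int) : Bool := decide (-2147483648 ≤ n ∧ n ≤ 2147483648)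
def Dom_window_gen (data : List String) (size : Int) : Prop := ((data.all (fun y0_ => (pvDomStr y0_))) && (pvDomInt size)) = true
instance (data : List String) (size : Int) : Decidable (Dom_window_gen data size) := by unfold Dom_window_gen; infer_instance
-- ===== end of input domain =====

-- B replaces A's incremental append/slice-drop window state machine by a closed-form
-- cut point plus direct slicing (alternative decomposition; same asymptotic cost).


-- ===== PORT A =====
-- loop body: win.append(thing); if len(win) == size: yield win; win = win[1:]
-- (win[1:] and win[i:] with i ≥ 0 are exactly List.drop)
def window_gen (data : List String) (size : Int) : List (List String) :=
  let st := data.foldl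
    (fun (st : List String × List (List String)) thing =>
      let win := st.1 ++ [thing]
      if (win.length : Int) = size then (win.drop 1, st.2 ++ [win]) else (win, st.2))
    ([], [])
  st.2 ++ (List.range st.1.length).map (fun i => st.1.drop i)

-- ===== PORT B =====
-- k = n - size + 1 if size >= 1 and n >= size else 0; then the two slicing loops
-- (data[j:j+size] with size ≥ 1 inside the first loop is drop/take; data[i:] is drop)
def window_gen_alt (data : List String) (size : Int) : List (List String) :=
  let n := data.length
  let k : Nat := if 1 ≤ size ∧ size ≤ (n : Int) then n - size.toNat + 1 else 0
  (List.range k).map (fun j => (data.drop j).take size.toNat)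
    ++ (List.range' k (n - k)).map (fun i => data.drop i)

-- ===== PRECONDITION & SPEC =====
def Spec_window_gen (data : List String) (size : Int) (out : List (List String)) : Prop := out = window_gen_alt data size
instance (data : List String) (size : Int) (out : List (List String)) : Decidable (Spec_window_gen data size out) := by unfold Spec_window_gen; infer_instance

-- ===== CLAIM (what is proved, stated in full; the proofs are below) =====
def Claim_equal_window_gen : Prop := ∀ (data : List String) (size : Int), Dom_window_gen data size → Spec_window_gen data size (window_gen data size)

-- ===== LEMMAS AND PROOFS =====

-- shifting a range' by one
theorem range'_succ_map (a n : Nat) : List.range' (a+1) n = (List.range' a n).map (· + 1) := by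
  induction n generalizing a with
  | zero => simp
  | succ n ih => simp [List.range'_succ, ih]

-- B's formula "peels" its first window when 1 ≤ size ≤ length
theorem alt_cons (full : List String) (size : Int)
    (h1 : 1 ≤ size) (h2 : size ≤ (full.length : Int)) :
    window_gen_alt full size = full.take size.toNat :: window_gen_alt (full.drop 1) size := by
  have hs1 : 1 ≤ size.toNat := by omega
  have hsn : size.toNat ≤ full.length := by omega
  unfold window_gen_alt
  simp only [if_pos (And.intro h1 h2), List.length_drop]
  by_cases hc : size ≤ ((full.length - 1 : Nat) : Int)
  · -- size < full.length : the tail still has fixed windows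
    simp only [if_pos (And.intro h1 hc)]
    have e1 : full.length - size.toNat + 1 = (full.length - size.toNat) + 1 := rfl
    have e2 : full.length - (full.length - size.toNat + 1) = size.toNat - 1 := by omega
    have e3 : full.length - 1 - size.toNat + 1 = full.length - size.toNat := by omega
    have e4 : full.length - 1 - (full.length - size.toNat) = size.toNat - 1 := by omega
    rw [e2, e3, e4, List.range_succ_eq_map, range'_succ_map]
    simp only [List.map_cons, List.map_map, List.drop_zero, List.cons_append]
    congr 1
    congr 1
    · apply List.map_congr_left; intro j _
      simp
    · apply List.map_congr_left; intro i _
      simp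
  · -- size = full.length : the tail yields only suffixes
    have hneg : ¬ (1 ≤ size ∧ size ≤ ((full.length - 1 : Nat) : Int)) := by omega
    simp only [if_neg hneg]
    have hsn' : size.toNat = full.length := by omega
    have e1 : full.length - size.toNat + 1 = 0 + 1 := by omega
    rw [e1, List.range_succ_eq_map, range'_succ_map]
    simp only [List.map_cons, List.map_map, List.drop_zero, List.range_zero,
      List.map_nil, List.cons_append, List.nil_append, Nat.sub_zero]
    congr 1
    apply List.map_congr_left; intro i _
    simp

-- main loop invariant
theorem loop_eq (size : Int) :
    ∀ (data win : List String) (out : List (List String)),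
      (size ≤ 0 ∨ (win.length : Int) < size) →
      (let st := data.foldl
        (fun (st : List String × List (List String)) thing =>
          let win := st.1 ++ [thing]
          if (win.length : Int) = size then (win.drop 1, st.2 ++ [win]) else (win, st.2))
        (win, out)
       st.2 ++ (List.range st.1.length).map (fun i => st.1.drop i))
      = out ++ window_gen_alt (win ++ data) size := by
  intro data
  induction data with
  | nil =>
    intro win out hyp
    simp only [List.foldl_nil, List.append_nil]
    unfold window_gen_alt
    have : ¬ (1 ≤ size ∧ size ≤ (win.length : Int)) := by omega
    simp [if_neg this, List.range_eq_range']
  | cons x xs ih =>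
    intro win out hyp
    simp only [List.foldl_cons]
    by_cases h : ((win ++ [x]).length : Int) = size
    · simp only [if_pos h]
      have hlen : (win ++ [x]).length = win.length + 1 := by simp
      have h1 : 1 ≤ size := by omega
      have ihyp : size ≤ 0 ∨ (((win ++ [x]).drop 1).length : Int) < size := by
        right; simp; omega
      rw [ih ((win ++ [x]).drop 1) (out ++ [win ++ [x]]) ihyp]
      have h2 : size ≤ (((win ++ [x]) ++ xs).length : Int) := by
        simp; omega
      have assoc : win ++ x :: xs = (win ++ [x]) ++ xs := by simp
      rw [assoc, alt_cons _ size h1 h2]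
      have hst : size.toNat = (win ++ [x]).length := by omega
      have hdrop : ((win ++ [x]) ++ xs).drop 1 = (win ++ [x]).drop 1 ++ xs :=
        List.drop_append_of_le_length (by simp)
      rw [hst, List.take_left, hdrop, List.append_assoc, List.singleton_append]
    · simp only [if_neg h]
      have ihyp : size ≤ 0 ∨ (((win ++ [x]).length : Int)) < size := by
        rcases hyp with h0 | h0
        · left; exact h0
        · right; simp at h ⊢; omega
      rw [ih (win ++ [x]) out ihyp]
      simp

-- ===== VERDICT (by name: the statement is the Claim_ definition above) =====
theorem window_gen_spec : Claim_equal_window_gen := by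
  intro data size _
  unfold Spec_window_gen window_gen
  simpa using loop_eq size data [] [] (by show size ≤ 0 ∨ ((0:Nat):Int) < size; omega)
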